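-- pv_equiv track=rewrite | github.com/michelleduong03/TIP-Course | TIP-102/Dictionaries/session3.py | best_set
-- ===== SOURCE A (Python) =====
-- def best_set(votes):
--     counts = {}
--
--     for voter_id, artist in votes.items():
--         if artist not in counts:
--             counts[artist] = 0
--         counts[artist] += 1
--
--     winner = max(counts, key=counts.get)
--     return winner
-- ===== SOURCE B (Python) =====
-- def best_set(votes):
--     # Single online pass: keep a running winner, replacing it whenever the artist
--     # just voted for now beats it on (vote count, earlier first appearance).
--     best = None
--     counts = {}
--     first = {}
--     for i, artist in enumerate(votes.values()):
--         if artist not in first: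
--             first[artist] = i
--             counts[artist] = 0
--         counts[artist] += 1
--         if best is None or (counts[artist], -first[artist]) > (counts[best], -first[best]):
--             best = artist
--     return best
-- ===== Notes on version B (the rewrite author's own statement) =====
-- stated objective: alternative
-- what changed: Replaces A's two-phase build-a-counts-dict-then-max(counts, key=counts.get) with a single fused online pass that maintains a running winner, replacing it whenever the artist just voted for beats it on the lexicographic key (current count, earlier first appearance); there is no final max scan over the keys.
-- outside the precondition, e.g. on best_set({}): A raises ValueError, B returns None
import Mathlib
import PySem

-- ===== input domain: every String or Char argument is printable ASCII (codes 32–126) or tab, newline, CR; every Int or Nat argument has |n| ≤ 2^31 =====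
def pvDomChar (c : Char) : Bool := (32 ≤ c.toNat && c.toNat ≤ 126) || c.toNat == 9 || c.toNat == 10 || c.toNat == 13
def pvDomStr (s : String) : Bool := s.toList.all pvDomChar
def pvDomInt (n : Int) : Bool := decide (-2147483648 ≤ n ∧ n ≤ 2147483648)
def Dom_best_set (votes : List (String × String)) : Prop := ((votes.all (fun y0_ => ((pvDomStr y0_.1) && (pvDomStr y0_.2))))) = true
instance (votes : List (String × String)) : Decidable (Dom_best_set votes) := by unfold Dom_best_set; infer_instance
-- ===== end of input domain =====

-- B fuses A's two phases (build a counts dict, then max over its keys) into one online pass that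
-- maintains a running winner by the key (count, earlier first appearance); equal return values are proved.


-- ===== PORT A =====
def best_set (votes : List (String × String)) : String :=
  let counts : PySem.Dict String Int :=
    votes.foldl (fun counts p =>
      -- if artist not in counts: counts[artist] = 0
      let counts := if counts.contains p.2 then counts else counts.insert p.2 0
      -- counts[artist] += 1
      counts.insert p.2 (counts.getD p.2 0 + 1)) PySem.Dict.empty
  -- winner = max(counts, key=counts.get); max over an empty dict raises ValueError (excluded by Pre_)
  (PySem.List.max? counts.keys (fun k => counts.getD k 0)).getD ""

-- ===== PORT B =====
-- Python's tuple comparison (c1, f1) > (c2, f2), specialised to the Int pairs B compares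
def bLexGt (a b : Int × Int) : Bool := a.1 > b.1 || (a.1 == b.1 && a.2 > b.2)

-- one iteration of B's loop; state = (counts, first, best)
def bStep (st : PySem.Dict String Int × PySem.Dict String Int × Option String)
    (p : Int × String) : PySem.Dict String Int × PySem.Dict String Int × Option String :=
  let counts := st.1
  let first := st.2.1
  let best := st.2.2
  -- if artist not in first: first[artist] = i; counts[artist] = 0
  let cf := if first.contains p.2 then (counts, first)
            else (counts.insert p.2 0, first.insert p.2 p.1)
  -- counts[artist] += 1
  let counts := cf.1.insert p.2 (cf.1.getD p.2 0 + 1)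
  let first := cf.2
  -- if best is None or (counts[artist], -first[artist]) > (counts[best], -first[best]): best = artist
  let best := match best with
    | none => some p.2
    | some w =>
        if bLexGt (counts.getD p.2 0, -(first.getD p.2 0)) (counts.getD w 0, -(first.getD w 0))
        then some p.2 else some w
  (counts, first, best)

def best_set_alt (votes : List (String × String)) : String :=
  let st := (PySem.List.enumerate (votes.map (fun p => p.2)) 0).foldl bStep
      (PySem.Dict.empty, PySem.Dict.empty, none)
  -- return best; on an empty dict the loop never runs (Python B returns None there; excluded by Pre_)
  st.2.2.getD ""

-- ===== PRECONDITION & SPEC =====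
-- Pre_ excludes the empty dict, on which A raises ValueError (max of an empty sequence) and B's loop never
-- sets a winner (Python B returns None, no String), and association lists with duplicate voter ids, which
-- do not represent a Python dict (A's input type): dict construction silently overwrites earlier duplicates.
def Pre_best_set (votes : List (String × String)) : Prop :=
  votes ≠ [] ∧ (votes.map Prod.fst).Nodup
instance (votes : List (String × String)) : Decidable (Pre_best_set votes) := by
  unfold Pre_best_set; infer_instance
def pvWitness_best_set : (List (String × String)) := [("v1", "a"), ("v2", "b"), ("v3", "a")]
def Spec_best_set (votes : List (String × String)) (out : String) : Prop := out = best_set_alt votes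
instance (votes : List (String × String)) (out : String) : Decidable (Spec_best_set votes out) := by unfold Spec_best_set; infer_instance

-- ===== CLAIM (what is proved, stated in full; the proofs are below) =====
def Claim_equal_best_set : Prop := ∀ (votes : List (String × String)), Dom_best_set votes → Pre_best_set votes → Spec_best_set votes (best_set votes)

-- ===== LEMMAS AND PROOFS =====

-- the winner both programs compute: maximal vote count, earliest first appearance on ties
def IsBest (p : List String) (w : String) : Prop :=
  w ∈ p ∧ ∀ a ∈ p, p.count a < p.count w ∨ (p.count a = p.count w ∧ p.idxOf w ≤ p.idxOf a)

theorem isBest_unique {p : List String} {u v : String}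
    (hu : IsBest p u) (hv : IsBest p v) : u = v := by
  obtain ⟨hum, hu2⟩ := hu
  obtain ⟨hvm, hv2⟩ := hv
  rcases hu2 v hvm with h | ⟨hc, hi⟩
  · rcases hv2 u hum with h' | ⟨hc', _⟩ <;> omega
  · rcases hv2 u hum with h' | ⟨_, hi'⟩
    · omega
    · have h : p.idxOf u = p.idxOf v := le_antisymm hi hi'
      have h1 := List.getElem_idxOf (List.idxOf_lt_length_of_mem hum)
      have h2 := List.getElem_idxOf (List.idxOf_lt_length_of_mem hvm)
      rw [← h1, ← h2]; congr 1

theorem idxOf_append_self_of_not_mem {α : Type} [BEq α] [LawfulBEq α] (l : List α) (a : α) (h : a ∉ l) :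
    (l ++ [a]).idxOf a = l.length := by
  induction l with
  | nil => simp
  | cons b t ih =>
    simp only [List.mem_cons, not_or] at h
    have hb : (b == a) = false := by simp [Ne.symm h.1]
    simp [List.cons_append, List.idxOf_cons, hb, ih h.2]

theorem count_append_singleton (l : List String) (a x : String) :
    (l ++ [x]).count a = l.count a + (if a = x then 1 else 0) := by
  rcases eq_or_ne a x with h | h
  · subst h; simp
  · simp [List.count_append, Ne.symm h, h]

-- appending a vote whose (count, first appearance) does not beat the current winner keeps it
theorem isBest_keep {p : List String} {x w : String} (hw : IsBest p w)
    (h1 : (p ++ [x]).count x ≤ (p ++ [x]).count w)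
    (h2 : (p ++ [x]).count x = (p ++ [x]).count w → (p ++ [x]).idxOf w ≤ (p ++ [x]).idxOf x) :
    IsBest (p ++ [x]) w := by
  obtain ⟨hwm, hw2⟩ := hw
  refine ⟨List.mem_append_left _ hwm, ?_⟩
  intro a ha
  by_cases hax : a = x
  · subst hax
    rcases lt_or_eq_of_le h1 with h | h
    · exact Or.inl h
    · exact Or.inr ⟨h, h2 h⟩
  · have hap : a ∈ p := by
      rcases List.mem_append.mp ha with h | h
      · exact h
      · simp only [List.mem_singleton] at h; exact absurd h hax
    have hca : (p ++ [x]).count a = p.count a := by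
      rw [count_append_singleton]; simp [hax]
    have hia : (p ++ [x]).idxOf a = p.idxOf a := List.idxOf_append_of_mem hap
    have hiw : (p ++ [x]).idxOf w = p.idxOf w := List.idxOf_append_of_mem hwm
    by_cases hwx : w = x
    · have hcw : (p ++ [x]).count w = p.count w + 1 := by
        rw [count_append_singleton]; simp [hwx]
      rcases hw2 a hap with h | ⟨h, _⟩ <;> (left; omega)
    · have hcw : (p ++ [x]).count w = p.count w := by
        rw [count_append_singleton]; simp [hwx]
      rcases hw2 a hap with h | ⟨h, hi⟩
      · left; omega
      · right; exact ⟨by omega, by rw [hiw, hia]; exact hi⟩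

-- appending a vote whose (count, first appearance) beats the current winner makes it the winner
theorem isBest_take {p : List String} {x w : String} (hw : IsBest p w)
    (h : (p ++ [x]).count w < (p ++ [x]).count x ∨
         ((p ++ [x]).count x = (p ++ [x]).count w ∧ (p ++ [x]).idxOf x < (p ++ [x]).idxOf w)) :
    IsBest (p ++ [x]) x := by
  obtain ⟨hwm, hw2⟩ := hw
  have hxw : x ≠ w := by
    rintro rfl
    rcases h with h | ⟨_, h⟩ <;> omega
  have hcx : (p ++ [x]).count x = p.count x + 1 := by
    rw [count_append_singleton]; simp
  have hcw : (p ++ [x]).count w = p.count w := by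
    rw [count_append_singleton]; simp [Ne.symm hxw]
  have hiw : (p ++ [x]).idxOf w = p.idxOf w := List.idxOf_append_of_mem hwm
  have hwpos : 0 < p.count w := List.count_pos_iff.mpr hwm
  refine ⟨List.mem_append_right _ (by simp), ?_⟩
  intro a ha
  by_cases hax : a = x
  · subst hax; exact Or.inr ⟨rfl, le_refl _⟩
  · have hap : a ∈ p := by
      rcases List.mem_append.mp ha with h' | h'
      · exact h'
      · simp only [List.mem_singleton] at h'; exact absurd h' hax
    have hca : (p ++ [x]).count a = p.count a := by
      rw [count_append_singleton]; simp [hax]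
    have hia : (p ++ [x]).idxOf a = p.idxOf a := List.idxOf_append_of_mem hap
    rcases h with hlt | ⟨heq, hidx⟩
    · have hxp : x ∈ p := by
        by_contra hxp
        have h0 : p.count x = 0 := List.count_eq_zero_of_not_mem hxp
        omega
      rcases hw2 x hxp with h' | ⟨h', _⟩
      · omega
      · rcases hw2 a hap with h'' | ⟨h'', _⟩ <;> (left; omega)
    · have hxp : x ∈ p := by
        by_contra hxp
        have hx1 : (p ++ [x]).idxOf x = p.length := idxOf_append_self_of_not_mem p x hxp
        have hw1 : p.idxOf w < p.length := List.idxOf_lt_length_of_mem hwm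
        omega
      have hix : (p ++ [x]).idxOf x = p.idxOf x := List.idxOf_append_of_mem hxp
      rcases hw2 a hap with h' | ⟨h', hi⟩
      · left; omega
      · right
        refine ⟨by omega, ?_⟩
        rw [hix, hia]
        rw [hix, hiw] at hidx
        omega

-- A-SIDE: one body of A's loop equals a single counting insert
theorem aStep_eq (c : PySem.Dict String Int) (x : String) :
    (let c' := if c.contains x then c else c.insert x 0;
     c'.insert x (c'.getD x 0 + 1)) = c.insert x (c.getD x 0 + 1) := by
  by_cases h : c.contains x = true
  · simp [h]
  · simp only [Bool.not_eq_true] at h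
    simp [h, PySem.Dict.getD_insert_self, PySem.Dict.insert_insert_self,
      PySem.Dict.getD_of_not_contains c 0 h]

-- Python's max-with-key fold step (the body of PySem.List.max?)
def maxStep {α : Type} (key : α → Int) (acc : Option α) (x : α) : Option α :=
  match acc with
  | none => some x
  | some m => if key m < key x then some x else some m

theorem max?_eq_foldl {α : Type} (l : List α) (key : α → Int) :
    PySem.List.max? l key = l.foldl (maxStep key) none := rfl

-- Python's max returns the FIRST element attaining the maximal key
theorem max?_first_idx {α : Type} [BEq α] [LawfulBEq α] (key : α → Int) (l : List α) :
    ∀ m, PySem.List.max? l key = some m →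
      ∀ a ∈ l, key a = key m → l.idxOf m ≤ l.idxOf a := by
  induction l using List.reverseRecOn with
  | nil => intro m h; rw [max?_eq_foldl] at h; exact absurd h (by simp)
  | append_singleton t x ih =>
    intro m h
    rw [max?_eq_foldl, List.foldl_append] at h
    cases ht : t.foldl (maxStep key) none with
    | none =>
      rw [ht] at h
      have h' : some x = some m := h
      obtain rfl := Option.some.inj h'
      have ht' : t = [] := (PySem.List.max?_eq_none_iff t key).mp (by rw [max?_eq_foldl]; exact ht)
      subst ht'
      intro a ha _
      simp only [List.nil_append, List.mem_singleton] at ha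
      subst ha; exact le_refl _
    | some m0 =>
      rw [ht] at h
      have hmax0 : PySem.List.max? t key = some m0 := by rw [max?_eq_foldl]; exact ht
      have hm0t : m0 ∈ t := PySem.List.max?_mem hmax0
      have h' : (if key m0 < key x then some x else some m0) = some m := h
      by_cases hlt : key m0 < key x
      · rw [if_pos hlt] at h'
        obtain rfl := Option.some.inj h'
        intro a ha hk
        rcases List.mem_append.mp ha with hat | hax
        · have := PySem.List.max?_isMax hmax0 a hat
          omega
        · simp only [List.mem_singleton] at hax
          subst hax; exact le_refl _
      · rw [if_neg hlt] at h'
        obtain rfl := Option.some.inj h'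
        have him0 : (t ++ [x]).idxOf m0 = t.idxOf m0 := List.idxOf_append_of_mem hm0t
        intro a ha hk
        rcases List.mem_append.mp ha with hat | hax
        · rw [him0, List.idxOf_append_of_mem hat]
          exact ih m0 hmax0 a hat hk
        · simp only [List.mem_singleton] at hax
          subst hax
          by_cases hxt : a ∈ t
          · rw [him0, List.idxOf_append_of_mem hxt]
            exact ih m0 hmax0 a hxt hk
          · rw [him0, idxOf_append_self_of_not_mem t a hxt]
            exact le_of_lt (List.idxOf_lt_length_of_mem hm0t)

-- removing every copy of an element whose key does not beat the current best leaves the fold unchanged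
theorem foldl_maxStep_discard {α : Type} [BEq α] [LawfulBEq α] (key : α → Int)
    (l : List α) (x b : α) (h : key x ≤ key b) :
    (PySem.Set.discard l x).foldl (maxStep key) (some b) = l.foldl (maxStep key) (some b) := by
  induction l generalizing b with
  | nil => rfl
  | cons y t ih =>
    by_cases hyx : y = x
    · have h0 : PySem.Set.discard (y :: t) x = PySem.Set.discard t x := by
        simp [PySem.Set.discard, hyx]
      have hstep : maxStep key (some b) y = some b := by
        simp [maxStep, not_lt.mpr (hyx ▸ h)]
      rw [h0, List.foldl_cons, hstep]
      exact ih b h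
    · obtain ⟨b', hb', hle⟩ : ∃ b', maxStep key (some b) y = some b' ∧ key b ≤ key b' := by
        by_cases hk : key b < key y
        · exact ⟨y, by simp [maxStep, hk], le_of_lt hk⟩
        · exact ⟨b, by simp [maxStep, hk], le_refl _⟩
      have h1 : PySem.Set.discard (y :: t) x = y :: PySem.Set.discard t x := by
        simp [PySem.Set.discard, List.filter_cons_of_pos, hyx]
      rw [h1, List.foldl_cons, List.foldl_cons, hb']
      exact ih b' (le_trans h hle)

theorem foldl_maxStep_ofList {α : Type} [BEq α] [LawfulBEq α] (key : α → Int)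
    (xs : List α) (acc : Option α) :
    (PySem.Set.ofList xs).foldl (maxStep key) acc = xs.foldl (maxStep key) acc := by
  induction xs generalizing acc with
  | nil => rfl
  | cons x t ih =>
    rw [PySem.Set.ofList_cons]
    simp only [List.foldl_cons]
    obtain ⟨b, hb, hxb⟩ : ∃ b, maxStep key acc x = some b ∧ key x ≤ key b := by
      cases acc with
      | none => exact ⟨x, rfl, le_refl _⟩
      | some m =>
        by_cases hmx : key m < key x
        · exact ⟨x, by simp [maxStep, hmx], le_refl _⟩
        · exact ⟨m, by simp [maxStep, hmx], not_lt.mp hmx⟩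
    rw [hb, foldl_maxStep_discard key _ x b hxb, ih]

-- tie-break equality: Python's max(-, key) over set-of-first-occurrences equals max over the list
theorem max?_ofList_eq {α : Type} [BEq α] [LawfulBEq α] (key : α → Int) (xs : List α) :
    PySem.List.max? (PySem.Set.ofList xs) key = PySem.List.max? xs key :=
  foldl_maxStep_ofList key xs none

-- A's winner (when it exists) is the IsBest element
theorem isBest_of_max? (vals : List String) (m : String)
    (h : PySem.List.max? vals (fun v => (vals.count v : Int)) = some m) : IsBest vals m := by
  refine ⟨PySem.List.max?_mem h, ?_⟩
  intro a ha
  have hle : ((vals.count a : Int)) ≤ (vals.count m : Int) := PySem.List.max?_isMax h a ha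
  by_cases hc : vals.count a = vals.count m
  · exact Or.inr ⟨hc, max?_first_idx (fun v => (vals.count v : Int)) vals m h a ha (by show ((vals.count a : Nat) : Int) = ((vals.count m : Nat) : Int); exact_mod_cast hc)⟩
  · left
    have : vals.count a ≤ vals.count m := by exact_mod_cast hle
    omega

-- B-SIDE: the loop invariant
def BInv (p : List String) (st : PySem.Dict String Int × PySem.Dict String Int × Option String) : Prop :=
  (∀ a, st.1.getD a 0 = (p.count a : Int)) ∧
  (∀ a, st.2.1.contains a = decide (a ∈ p)) ∧
  (∀ a ∈ p, st.2.1.getD a 0 = (p.idxOf a : Int)) ∧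
  (match st.2.2 with | none => p = [] | some w => IsBest p w)

theorem isBest_single (x : String) : IsBest [x] x := by
  refine ⟨by simp, ?_⟩
  intro a ha
  simp only [List.mem_singleton] at ha
  subst ha
  exact Or.inr ⟨rfl, le_refl _⟩

-- B's update of the running winner preserves being the IsBest element
theorem winner_step (p : List String) (x w : String) (hw : IsBest p w) :
    IsBest (p ++ [x])
      (if bLexGt (((p ++ [x]).count x : Int), -((p ++ [x]).idxOf x : Int))
                 (((p ++ [x]).count w : Int), -((p ++ [x]).idxOf w : Int)) = true
       then x else w) := by
  by_cases hb : bLexGt (((p ++ [x]).count x : Int), -((p ++ [x]).idxOf x : Int))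
      (((p ++ [x]).count w : Int), -((p ++ [x]).idxOf w : Int)) = true
  · rw [if_pos hb]
    simp only [bLexGt, gt_iff_lt, Bool.or_eq_true, decide_eq_true_eq, Bool.and_eq_true,
      beq_iff_eq] at hb
    exact isBest_take hw (by omega)
  · rw [if_neg hb]
    simp only [bLexGt, gt_iff_lt, Bool.or_eq_true, decide_eq_true_eq, Bool.and_eq_true,
      beq_iff_eq, not_or, not_and, not_lt] at hb
    exact isBest_keep hw (by omega) (by omega)

theorem bStep_eq_of_contains (c f : PySem.Dict String Int) (b : Option String)
    (x : String) (i : Int) (hc : f.contains x = true) :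
    bStep (c, f, b) (i, x) =
      (c.insert x (c.getD x 0 + 1), f,
       match b with
       | none => some x
       | some w => if bLexGt ((c.insert x (c.getD x 0 + 1)).getD x 0, -(f.getD x 0))
                            ((c.insert x (c.getD x 0 + 1)).getD w 0, -(f.getD w 0))
                   then some x else some w) := by
  cases b <;> simp [bStep, hc]

theorem bStep_eq_of_not_contains (c f : PySem.Dict String Int) (b : Option String)
    (x : String) (i : Int) (hc : f.contains x = false) :
    bStep (c, f, b) (i, x) =
      (c.insert x 1, f.insert x i,
       match b with
       | none => some x
       | some w => if bLexGt ((c.insert x 1).getD x 0, -((f.insert x i).getD x 0))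
                            ((c.insert x 1).getD w 0, -((f.insert x i).getD w 0))
                   then some x else some w) := by
  cases b <;> simp [bStep, hc, PySem.Dict.getD_insert_self, PySem.Dict.insert_insert_self]

theorem inv_bStep (p : List String) (x : String)
    (st : PySem.Dict String Int × PySem.Dict String Int × Option String)
    (hinv : BInv p st) : BInv (p ++ [x]) (bStep st ((p.length : Int), x)) := by
  obtain ⟨c, f, b⟩ := st
  obtain ⟨h1, h2, h3, h4⟩ := hinv
  simp only at h1 h2 h3 h4
  by_cases hx : x ∈ p
  · have hc : f.contains x = true := by rw [h2 x]; simp [hx]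
    rw [bStep_eq_of_contains c f b x _ hc]
    have e1 : (c.insert x (c.getD x 0 + 1)).getD x 0 = ((p ++ [x]).count x : Int) := by
      rw [PySem.Dict.getD_insert_self, h1 x, count_append_singleton]
      push_cast; simp
    refine ⟨?_, ?_, ?_, ?_⟩
    · intro a
      by_cases hax : a = x
      · subst hax; exact e1
      · rw [PySem.Dict.getD_insert]
        rw [if_neg hax, h1 a, count_append_singleton]
        simp [hax]
    · intro a
      rw [h2 a, decide_eq_decide]
      by_cases hax : a = x
      · subst hax; simp [hx]
      · simp [hax]
    · intro a ha
      have hap : a ∈ p := by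
        rcases List.mem_append.mp ha with h | h
        · exact h
        · simp only [List.mem_singleton] at h; subst h; exact hx
      rw [h3 a hap, List.idxOf_append_of_mem hap]
    · cases b with
      | none =>
        subst h4
        simp at hx
      | some w =>
        have hwm := h4.1
        have e2 : (c.insert x (c.getD x 0 + 1)).getD w 0 = ((p ++ [x]).count w : Int) := by
          by_cases hwx : w = x
          · subst hwx; exact e1
          · rw [PySem.Dict.getD_insert, if_neg hwx, h1 w, count_append_singleton]
            simp [hwx]
        have e3 : f.getD x 0 = ((p ++ [x]).idxOf x : Int) := by
          rw [h3 x hx, List.idxOf_append_of_mem hx]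
        have e4 : f.getD w 0 = ((p ++ [x]).idxOf w : Int) := by
          rw [h3 w hwm, List.idxOf_append_of_mem hwm]
        show (match (if bLexGt ((c.insert x (c.getD x 0 + 1)).getD x 0, -(f.getD x 0))
                      ((c.insert x (c.getD x 0 + 1)).getD w 0, -(f.getD w 0))
                    then some x else some w : Option String) with
              | none => p ++ [x] = [] | some w' => IsBest (p ++ [x]) w')
        rw [e1, e2, e3, e4]
        have hws := winner_step p x w h4
        by_cases hbx : bLexGt (((p ++ [x]).count x : Int), -((p ++ [x]).idxOf x : Int))
            (((p ++ [x]).count w : Int), -((p ++ [x]).idxOf w : Int)) = true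
        · rw [if_pos hbx] at hws ⊢; exact hws
        · rw [if_neg hbx] at hws ⊢; exact hws
  · have hc : f.contains x = false := by rw [h2 x]; simp [hx]
    rw [bStep_eq_of_not_contains c f b x _ hc]
    have hcx0 : p.count x = 0 := List.count_eq_zero_of_not_mem hx
    have e1 : (c.insert x 1).getD x 0 = ((p ++ [x]).count x : Int) := by
      rw [PySem.Dict.getD_insert_self, count_append_singleton]
      simp [hcx0]
    have e3 : (f.insert x (p.length : Int)).getD x 0 = ((p ++ [x]).idxOf x : Int) := by
      rw [PySem.Dict.getD_insert_self, idxOf_append_self_of_not_mem p x hx]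
    refine ⟨?_, ?_, ?_, ?_⟩
    · intro a
      by_cases hax : a = x
      · subst hax; exact e1
      · rw [PySem.Dict.getD_insert, if_neg hax, h1 a, count_append_singleton]
        simp [hax]
    · intro a
      rw [PySem.Dict.contains_insert, h2 a]
      by_cases hax : a = x
      · subst hax; simp
      · simp [hax]
    · intro a ha
      by_cases hax : a = x
      · subst hax; exact e3
      · have hap : a ∈ p := by
          rcases List.mem_append.mp ha with h | h
          · exact h
          · simp only [List.mem_singleton] at h; exact absurd h hax
        rw [PySem.Dict.getD_insert, if_neg hax, h3 a hap, List.idxOf_append_of_mem hap]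
    · cases b with
      | none =>
        subst h4
        exact isBest_single x
      | some w =>
        have hwm := h4.1
        have hwx : w ≠ x := fun h => hx (h ▸ hwm)
        have e2 : (c.insert x 1).getD w 0 = ((p ++ [x]).count w : Int) := by
          rw [PySem.Dict.getD_insert, if_neg hwx, h1 w, count_append_singleton]
          simp [hwx]
        have e4 : (f.insert x (p.length : Int)).getD w 0 = ((p ++ [x]).idxOf w : Int) := by
          rw [PySem.Dict.getD_insert, if_neg hwx, h3 w hwm, List.idxOf_append_of_mem hwm]
        show (match (if bLexGt ((c.insert x 1).getD x 0, -((f.insert x (p.length : Int)).getD x 0))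
                      ((c.insert x 1).getD w 0, -((f.insert x (p.length : Int)).getD w 0))
                    then some x else some w : Option String) with
              | none => p ++ [x] = [] | some w' => IsBest (p ++ [x]) w')
        rw [e1, e2, e3, e4]
        have hws := winner_step p x w h4
        by_cases hbx : bLexGt (((p ++ [x]).count x : Int), -((p ++ [x]).idxOf x : Int))
            (((p ++ [x]).count w : Int), -((p ++ [x]).idxOf w : Int)) = true
        · rw [if_pos hbx] at hws ⊢; exact hws
        · rw [if_neg hbx] at hws ⊢; exact hws

theorem inv_fold (vals : List String) :
    BInv vals ((PySem.List.enumerate vals 0).foldl bStep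
      (PySem.Dict.empty, PySem.Dict.empty, none)) := by
  induction vals using List.reverseRecOn with
  | nil =>
    refine ⟨?_, ?_, ?_, rfl⟩
    · intro a; simp [PySem.List.enumerate_nil, PySem.Dict.getD_empty]
    · intro a; simp [PySem.List.enumerate_nil, PySem.Dict.contains_empty]
    · intro a ha; simp at ha
  | append_singleton p x ih =>
    rw [PySem.List.enumerate_append, List.foldl_append]
    have he : PySem.List.enumerate [x] ((0 : Int) + (p.length : Int)) = [((p.length : Int), x)] := by
      simp [PySem.List.enumerate_cons]
    rw [he]
    simp only [List.foldl_cons, List.foldl_nil]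
    exact inv_bStep p x _ ih

-- ===== VERDICT (by name: the statement is the Claim_ definition above) =====
theorem best_set_spec : Claim_equal_best_set := by
  intro votes _ hpre
  obtain ⟨hne, -⟩ := hpre
  unfold Spec_best_set best_set best_set_alt
  have hfold :
      votes.foldl (fun counts p =>
        (if counts.contains p.2 then counts else counts.insert p.2 0).insert p.2
          ((if counts.contains p.2 then counts else counts.insert p.2 0).getD p.2 0 + 1))
        (PySem.Dict.empty : PySem.Dict String Int)
      = (votes.map (fun p => p.2)).foldl
          (fun c x => c.insert x (c.getD x 0 + 1)) PySem.Dict.empty := by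
    rw [List.foldl_map]
    exact PySem.List.foldl_congr_mem votes _ _ _ (fun acc p _ => aStep_eq acc p.2)
  rw [hfold]
  have hkeys :
      ((votes.map (fun p => p.2)).foldl
        (fun c x => c.insert x (c.getD x 0 + 1))
        (PySem.Dict.empty : PySem.Dict String Int)).keys
      = PySem.Set.ofList (votes.map (fun p => p.2)) := by
    rw [PySem.Dict.keys_foldl_insert, PySem.Dict.keys_empty, PySem.Set.update_nil_left]
  have hkey :
      (fun k => ((votes.map (fun p => p.2)).foldl
        (fun c x => c.insert x (c.getD x 0 + 1))
        (PySem.Dict.empty : PySem.Dict String Int)).getD k 0)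
      = (fun v => (((votes.map (fun p => p.2)).count v : Int))) := by
    funext k
    rw [PySem.Dict.getD_foldl_insert_add_one, PySem.Dict.getD_empty]
    simp
  simp only [hkeys, hkey, max?_ofList_eq]
  have hvne : votes.map (fun p => p.2) ≠ [] := by
    simp only [ne_eq, List.map_eq_nil_iff]; exact hne
  obtain ⟨m, hm⟩ : ∃ m, PySem.List.max? (votes.map (fun p => p.2))
      (fun v => (((votes.map (fun p => p.2)).count v : Int))) = some m := by
    cases h : PySem.List.max? (votes.map (fun p => p.2))
        (fun v => (((votes.map (fun p => p.2)).count v : Int))) with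
    | none =>
      exact absurd ((PySem.List.max?_eq_none_iff (votes.map (fun p => p.2))
        (fun v => (((votes.map (fun p => p.2)).count v : Int)))).mp h) hvne
    | some m => exact ⟨m, rfl⟩
  have hmb := isBest_of_max? (votes.map (fun p => p.2)) m hm
  obtain ⟨-, -, -, h4⟩ := inv_fold (votes.map (fun p => p.2))
  cases hb : ((PySem.List.enumerate (votes.map (fun p => p.2)) 0).foldl bStep
      (PySem.Dict.empty, PySem.Dict.empty, none)).2.2 with
  | none =>
    rw [hb] at h4
    exact absurd h4 hvne
  | some w =>
    rw [hb] at h4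
    rw [hm]
    simp only [Option.getD_some]
    exact isBest_unique hmb h4
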